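-- pv_equiv track=rewrite | github.com/trtr6842-git/MCP_Core | src/kicad_mcp/semantic/asciidoc_chunker.py | _cap_chunk
-- ===== SOURCE A (Python) =====
-- def _greedy_merge(pieces: list[str], sep: str, max_chars: int) -> list[str]:
--     """Greedily merge pieces (joined with sep) while staying under max_chars."""
--     result: list[str] = []
--     current = ''
--     for piece in pieces:
--         if not current:
--             current = piece
--         else:
--             candidate = current + sep + piece
--             if len(candidate) <= max_chars:
--                 current = candidate
--             else:
--                 result.append(current)
--                 current = piece
--     if current:
--         result.append(current)
--     return result
--
-- def _cap_chunk(text: str, max_chars: int) -> list[str]: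
--     """
--     Recursively split text into pieces no larger than max_chars.
--
--     Split order:
--       1. '\\n' (line boundaries)
--       2. '. ' (sentence boundaries)
--       3. ' '  (word boundaries — last resort)
--     """
--     if len(text) <= max_chars:
--         return [text]
--
--     # Level 1: split on newlines
--     merged = _greedy_merge(text.split('\n'), '\n', max_chars)
--     still_over = [p for p in merged if len(p) > max_chars]
--     if not still_over:
--         return merged
--
--     # Level 2: split sentences for overlong pieces
--     result: list[str] = []
--     for piece in merged:
--         if len(piece) <= max_chars:
--             result.append(piece)
--             continue
--         sent_merged = _greedy_merge(piece.split('. '), '. ', max_chars)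
--         still_over2 = [p for p in sent_merged if len(p) > max_chars]
--         if not still_over2:
--             result.extend(sent_merged)
--             continue
--
--         # Level 3: word boundaries
--         for sp in sent_merged:
--             if len(sp) <= max_chars:
--                 result.append(sp)
--             else:
--                 result.extend(_greedy_merge(sp.split(' '), ' ', max_chars))
--
--     return result
-- ===== SOURCE B (Python) =====
-- def _greedy_merge(pieces: list[str], sep: str, max_chars: int) -> list[str]:
--     """Greedily merge pieces (joined with sep) while staying under max_chars."""
--     result: list[str] = []
--     current = ''
--     for piece in pieces:
--         if not current:
--             current = piece
--         else:
--             candidate = current + sep + piece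
--             if len(candidate) <= max_chars:
--                 current = candidate
--             else:
--                 result.append(current)
--                 current = piece
--     if current:
--         result.append(current)
--     return result
--
--
-- _SEPS = ('\n', '. ', ' ')
--
--
-- def _cap_chunk_rec(text: str, max_chars: int, seps: tuple) -> list[str]:
--     """Recursive core: greedy-merge on the first separator, recurse on the rest."""
--     if len(text) <= max_chars or not seps:
--         return [text]
--     sep, rest = seps[0], seps[1:]
--     out: list[str] = []
--     for piece in _greedy_merge(text.split(sep), sep, max_chars):
--         out.extend(_cap_chunk_rec(piece, max_chars, rest))
--     return out
--
--
-- def _cap_chunk(text: str, max_chars: int) -> list[str]: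
--     return _cap_chunk_rec(text, max_chars, _SEPS)
-- ===== Notes on version B (the rewrite author's own statement) =====
-- stated objective: simpler
-- what changed: Replaces the three hand-unrolled split levels and their still-over filter checks with one recursion over the ordered separator list ('\n', '. ', ' '), greedy-merging on the first separator and recursing on the rest for each piece; _greedy_merge is kept byte-identical.
import Mathlib
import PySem

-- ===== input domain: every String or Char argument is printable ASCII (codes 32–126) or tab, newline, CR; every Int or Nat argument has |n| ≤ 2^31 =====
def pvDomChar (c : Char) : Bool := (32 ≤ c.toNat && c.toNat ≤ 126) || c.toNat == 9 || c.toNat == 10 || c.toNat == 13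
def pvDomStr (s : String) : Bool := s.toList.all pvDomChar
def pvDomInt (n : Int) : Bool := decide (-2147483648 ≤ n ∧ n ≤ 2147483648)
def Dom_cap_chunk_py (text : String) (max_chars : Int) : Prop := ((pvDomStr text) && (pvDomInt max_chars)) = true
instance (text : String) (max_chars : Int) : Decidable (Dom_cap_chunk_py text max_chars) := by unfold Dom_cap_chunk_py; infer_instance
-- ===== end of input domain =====

-- B replaces A's three hand-unrolled split levels by one recursion over the separator list; same output, simpler decomposition (no speed claim).

-- ===== PORT A =====
-- text.split(sep): every sep used in this file is a nonempty literal, so Str.split? is `some`; getD makes it total (exact here).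
def pysplit (s sep : String) : List String := (PySem.Str.split? s sep).getD [s]

-- _greedy_merge, shared verbatim by Source A and Source B (byte-identical in both sources)
def greedyMerge (pieces : List String) (sep : String) (max_chars : Int) : List String :=
  let st := pieces.foldl (fun (s : List String × String) piece =>
    if s.2 = "" then (s.1, piece)
    else
      let candidate := s.2 ++ sep ++ piece
      if PySem.Str.len candidate ≤ max_chars then (s.1, candidate)
      else (s.1 ++ [s.2], piece)) ([], "")
  if st.2 ≠ "" then st.1 ++ [st.2] else st.1

def cap_chunk_py (text : String) (max_chars : Int) : List String :=
  if PySem.Str.len text ≤ max_chars then [text]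
  else
    let merged := greedyMerge (pysplit text "\n") "\n" max_chars
    let still_over := merged.filter (fun p => max_chars < PySem.Str.len p)
    if still_over = [] then merged
    else
      merged.foldl (fun result piece =>
        if PySem.Str.len piece ≤ max_chars then result ++ [piece]
        else
          let sent_merged := greedyMerge (pysplit piece ". ") ". " max_chars
          let still_over2 := sent_merged.filter (fun p => max_chars < PySem.Str.len p)
          if still_over2 = [] then result ++ sent_merged
          else
            sent_merged.foldl (fun result sp =>
              if PySem.Str.len sp ≤ max_chars then result ++ [sp]
              else result ++ greedyMerge (pysplit sp " ") " " max_chars) result) []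

-- ===== PORT B =====
def capRec : List String → String → Int → List String
  | [], text, _ => [text]
  | sep :: rest, text, max_chars =>
    if PySem.Str.len text ≤ max_chars then [text]
    else
      (greedyMerge (pysplit text sep) sep max_chars).foldl
        (fun out piece => out ++ capRec rest piece max_chars) []

def cap_chunk_py_alt (text : String) (max_chars : Int) : List String :=
  capRec ["\n", ". ", " "] text max_chars

-- ===== PRECONDITION & SPEC =====
def Spec_cap_chunk_py (text : String) (max_chars : Int) (out : List String) : Prop := out = cap_chunk_py_alt text max_chars
instance (text : String) (max_chars : Int) (out : List String) : Decidable (Spec_cap_chunk_py text max_chars out) := by unfold Spec_cap_chunk_py; infer_instance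

-- ===== CLAIM (what is proved, stated in full; the proofs are below) =====
def Claim_equal_cap_chunk_py : Prop := ∀ (text : String) (max_chars : Int), Dom_cap_chunk_py text max_chars → Spec_cap_chunk_py text max_chars (cap_chunk_py text max_chars)

-- ===== LEMMAS AND PROOFS =====

-- proof-only names for A's inner levels
def wordLevel (m : Int) (sp : String) : List String :=
  if PySem.Str.len sp ≤ m then [sp] else greedyMerge (pysplit sp " ") " " m

def sentLevel (m : Int) (piece : String) : List String :=
  if PySem.Str.len piece ≤ m then [piece]
  else if (greedyMerge (pysplit piece ". ") ". " m).filter (fun p => m < PySem.Str.len p) = [] then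
    greedyMerge (pysplit piece ". ") ". " m
  else (greedyMerge (pysplit piece ". ") ". " m).flatMap (wordLevel m)

-- a foldl accumulating `acc ++ g x` is a flatMap
theorem foldl_flat (l : List String) (g : String → List String) (acc : List String) :
    l.foldl (fun out p => out ++ g p) acc = acc ++ l.flatMap g :=
  PySem.List.foldl_append_eq_flatMap g l acc

theorem capRec_cons (sep : String) (rest : List String) (text : String) (m : Int) :
    capRec (sep :: rest) text m
      = if PySem.Str.len text ≤ m then [text]
        else (greedyMerge (pysplit text sep) sep m).flatMap (fun p => capRec rest p m) := by
  rw [capRec]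
  split
  · rfl
  · exact (foldl_flat _ _ []).trans (List.nil_append _)

theorem capRec_of_le {seps : List String} {text : String} {m : Int}
    (h : PySem.Str.len text ≤ m) : capRec seps text m = [text] := by
  cases seps with
  | nil => rfl
  | cons s r => rw [capRec_cons, if_pos h]

theorem capRec_word (sp : String) (m : Int) : capRec [" "] sp m = wordLevel m sp := by
  rw [capRec_cons, wordLevel]
  split
  · rfl
  · simp [capRec]

-- if no element is over the cap, flatMapping a function that is the identity under the cap is the identity
theorem flatMap_id_of_ok (m : Int) (l : List String) (g : String → List String)
    (hg : ∀ x, PySem.Str.len x ≤ m → g x = [x])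
    (h : l.filter (fun p => m < PySem.Str.len p) = []) :
    l.flatMap g = l := by
  induction l with
  | nil => rfl
  | cons a t ih =>
    simp only [List.filter_cons] at h
    split at h
    · exact absurd h (by simp)
    · rename_i hd
      simp only [decide_eq_true_eq, not_lt] at hd
      simp [List.flatMap_cons, hg a hd, ih h]

theorem capRec_sent (piece : String) (m : Int) : capRec [". ", " "] piece m = sentLevel m piece := by
  rw [capRec_cons, sentLevel]
  split
  · rfl
  · rw [List.flatMap_congr (fun sp _ => capRec_word sp m)]
    split
    · rename_i h
      exact flatMap_id_of_ok m _ _ (fun x hx => by rw [wordLevel, if_pos hx]) h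
    · rfl

-- A's inner (level-3) loop is a flatMap of wordLevel
theorem inner_foldl (sent : List String) (m : Int) (acc : List String) :
    sent.foldl (fun result sp =>
        if PySem.Str.len sp ≤ m then result ++ [sp]
        else result ++ greedyMerge (pysplit sp " ") " " m) acc
      = acc ++ sent.flatMap (wordLevel m) := by
  exact (PySem.List.foldl_congr_mem _ _ (fun result sp => result ++ wordLevel m sp) _
      (by intro a x _; simp only [wordLevel]; split <;> rfl)).trans (foldl_flat _ _ _)

-- A's level-2 loop is a flatMap of sentLevel
theorem outer_foldl (merged : List String) (m : Int) :
    merged.foldl (fun result piece =>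
        if PySem.Str.len piece ≤ m then result ++ [piece]
        else
          let sent_merged := greedyMerge (pysplit piece ". ") ". " m
          let still_over2 := sent_merged.filter (fun p => m < PySem.Str.len p)
          if still_over2 = [] then result ++ sent_merged
          else
            sent_merged.foldl (fun result sp =>
              if PySem.Str.len sp ≤ m then result ++ [sp]
              else result ++ greedyMerge (pysplit sp " ") " " m) result) []
      = merged.flatMap (sentLevel m) := by
  refine (PySem.List.foldl_congr_mem _ _ (fun result piece => result ++ sentLevel m piece) _ ?_).trans
    ((foldl_flat _ _ _).trans (List.nil_append _))
  intro acc piece _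
  simp only [sentLevel]
  split
  · rfl
  · split
    · rfl
    · exact inner_foldl _ m acc

theorem cap_eq (text : String) (m : Int) : cap_chunk_py text m = cap_chunk_py_alt text m := by
  unfold cap_chunk_py cap_chunk_py_alt
  rw [capRec_cons]
  split
  · rfl
  · simp only [outer_foldl]
    rw [List.flatMap_congr (fun p _ => (capRec_sent p m).symm)] 
    split
    · rename_i h
      exact (flatMap_id_of_ok m _ _ (fun x hx => capRec_of_le hx) h).symm
    · rfl

-- ===== VERDICT (by name: the statement is the Claim_ definition above) =====
theorem cap_chunk_py_spec : Claim_equal_cap_chunk_py := by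
  intro text m _
  exact cap_eq text m
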